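-- pv_equiv track=rewrite | github.com/obtusa07/algorithm | 프로그래머스/lv0/120848. 팩토리얼/팩토리얼.py | solution
-- ===== SOURCE A (Python) =====
-- def solution(n):
--     answer = 1
--     def factorial(num):
--         if num == 1:
--             return 1
--         return num * factorial(num - 1)
--
--     while factorial(answer) <= n:
--         answer += 1
--
--     return answer - 1
-- ===== SOURCE B (Python) =====
-- def solution(n):
--     k = 0
--     f = 1
--     while f * (k + 1) <= n:
--         k += 1
--         f *= k
--     return k
-- ===== Notes on version B (the rewrite author's own statement) =====
-- stated objective: faster
-- what changed: Replaces the recursive factorial helper recomputed from scratch each iteration with a single incremental running product updated once per step.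
import Mathlib
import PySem

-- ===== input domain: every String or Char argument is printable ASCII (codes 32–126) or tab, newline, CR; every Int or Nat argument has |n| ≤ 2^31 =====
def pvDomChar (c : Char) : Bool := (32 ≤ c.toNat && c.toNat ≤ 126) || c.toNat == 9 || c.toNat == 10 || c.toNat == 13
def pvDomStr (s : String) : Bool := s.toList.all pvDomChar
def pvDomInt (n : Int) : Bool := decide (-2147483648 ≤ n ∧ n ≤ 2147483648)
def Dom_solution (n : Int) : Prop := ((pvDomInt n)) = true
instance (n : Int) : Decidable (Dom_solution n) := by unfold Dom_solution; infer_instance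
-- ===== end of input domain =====

-- B replaces A's per-iteration recursive factorial recomputation with one incremental running product (constant-factor speedup).


-- ===== PORT A =====
-- factorial(num): Python's base case is num == 1 and it is only ever called with num ≥ 1;
-- the guard `num ≤ 1` only makes the recursion total (Python diverges below 1, never reached).
def factA (num : Int) : Int :=
  if num ≤ 1 then 1 else num * factA (num - 1)
termination_by num.toNat
decreasing_by omega

-- the while loop `while factorial(answer) <= n: answer += 1`; fuel is a totality guard only:
-- on Dom (|n| ≤ 2^31) the loop exits after at most 13 iterations, far below 64.
def loopA (fuel : Nat) (n answer : Int) : Int :=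
  match fuel with
  | 0 => answer - 1
  | fuel + 1 => if factA answer ≤ n then loopA fuel n (answer + 1) else answer - 1

def solution (n : Int) : Int := loopA 64 n 1

-- ===== PORT B =====
-- incremental running product: f = k! maintained across iterations
def loopB (fuel : Nat) (n k f : Int) : Int :=
  match fuel with
  | 0 => k
  | fuel + 1 => if f * (k + 1) ≤ n then loopB fuel n (k + 1) (f * (k + 1)) else k

def solution_alt (n : Int) : Int := loopB 64 n 0 1

-- ===== PRECONDITION & SPEC =====
def Spec_solution (n : Int) (out : Int) : Prop := out = solution_alt n
instance (n : Int) (out : Int) : Decidable (Spec_solution n out) := by unfold Spec_solution; infer_instance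

-- ===== CLAIM (what is proved, stated in full; the proofs are below) =====
def Claim_equal_solution : Prop := ∀ (n : Int), Dom_solution n → Spec_solution n (solution n)

-- ===== LEMMAS AND PROOFS =====

theorem factA_succ (k : Int) (hk : 0 ≤ k) : factA (k + 1) = (k + 1) * factA k := by
  rcases eq_or_lt_of_le hk with h | h
  · subst h; simp [factA]
  · rw [factA]
    simp [show ¬ (k + 1 ≤ 1) by omega]

theorem loop_eq (fuel : Nat) (n k : Int) (hk : 0 ≤ k) :
    loopA fuel n (k + 1) = loopB fuel n k (factA k) := by
  induction fuel generalizing k with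
  | zero => simp [loopA, loopB]
  | succ fuel ih =>
    rw [loopA, loopB]
    rw [show factA k * (k + 1) = factA (k + 1) by rw [factA_succ k hk]; ring]
    split
    · rw [show k + 1 + 1 = (k + 1) + 1 by ring, ih (k + 1) (by omega)]
    · omega

-- ===== VERDICT (by name: the statement is the Claim_ definition above) =====
theorem solution_spec : Claim_equal_solution := by
  intro n _
  unfold Spec_solution solution solution_alt
  have := loop_eq 64 n 0 le_rfl
  simpa [factA] using this
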